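-- pv_equiv track=rewrite | github.com/sjlongland/ravespan | libcommon.py | last_not_None
-- ===== SOURCE A (Python) =====
-- def last_not_None(alist):
--     """ returns last non-None value from the list """
--     last = None
--     llen = len(alist)
--     for i,el in enumerate(reversed(alist)):
--         if el is not None:
--             last = llen - i - 1
--             break
--     return last
-- ===== SOURCE B (Python) =====
-- def last_not_None(alist):
--     """ returns last non-None value from the list """
--     last = None
--     for i, el in enumerate(alist):
--         if el is not None:
--             last = i
--     return last
-- ===== Notes on version B (the rewrite author's own statement) =====
-- stated objective: simpler
-- what changed: Forward scan keeping the most recent non-None index in an accumulator, instead of A's reversed enumeration with an early break and index arithmetic llen - i - 1.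
import Mathlib
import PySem

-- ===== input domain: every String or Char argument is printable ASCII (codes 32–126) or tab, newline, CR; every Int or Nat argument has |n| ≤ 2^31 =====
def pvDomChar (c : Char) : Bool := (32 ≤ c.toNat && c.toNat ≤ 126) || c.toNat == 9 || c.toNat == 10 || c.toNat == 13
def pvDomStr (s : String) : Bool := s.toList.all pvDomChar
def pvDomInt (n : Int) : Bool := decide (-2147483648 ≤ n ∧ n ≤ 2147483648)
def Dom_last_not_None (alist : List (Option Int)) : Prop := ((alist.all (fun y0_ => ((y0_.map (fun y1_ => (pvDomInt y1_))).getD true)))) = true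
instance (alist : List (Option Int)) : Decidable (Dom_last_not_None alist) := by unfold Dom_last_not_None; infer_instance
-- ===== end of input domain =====

-- B replaces A's reversed scan with break and 'llen - i - 1' arithmetic by a plain forward
-- scan keeping the last non-None index in an accumulator (objective: simpler).

-- ===== PORT A =====
-- the for-loop over enumerate(reversed(alist)) with its break: first hit wins
def lastA_loop (llen : Int) : List (Int × Option Int) → Option Int
  | [] => none
  | (i, el) :: rest => if el ≠ none then some (llen - i - 1) else lastA_loop llen rest

def last_not_None (alist : List (Option Int)) : Option Int :=
  lastA_loop (alist.length : Int) (PySem.List.enumerate alist.reverse)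

-- ===== PORT B =====
-- forward loop, accumulator overwritten at every non-None element
def last_not_None_alt (alist : List (Option Int)) : Option Int :=
  (PySem.List.enumerate alist).foldl
    (fun last p => if p.2 ≠ none then some p.1 else last) none

-- ===== PRECONDITION & SPEC =====
def Spec_last_not_None (alist : List (Option Int)) (out : Option Int) : Prop := out = last_not_None_alt alist
instance (alist : List (Option Int)) (out : Option Int) : Decidable (Spec_last_not_None alist out) := by unfold Spec_last_not_None; infer_instance

-- ===== CLAIM (what is proved, stated in full; the proofs are below) =====
def Claim_equal_last_not_None : Prop := ∀ (alist : List (Option Int)), Dom_last_not_None alist → Spec_last_not_None alist (last_not_None alist)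

-- ===== LEMMAS AND PROOFS =====

-- index of the FIRST non-None element (what A's break finds on the reversed list)
def firstIdx : List (Option Int) → Option Nat
  | [] => none
  | x :: xs => if x ≠ none then some 0 else (firstIdx xs).map (· + 1)

-- index of the LAST non-None element (the common reference value)
def lastIdx : List (Option Int) → Option Nat
  | [] => none
  | x :: xs =>
    match lastIdx xs with
    | some j => some (j + 1)
    | none => if x ≠ none then some 0 else none

theorem firstIdx_lt {xs : List (Option Int)} {i : Nat} (h : firstIdx xs = some i) :
    i < xs.length := by
  induction xs generalizing i with
  | nil => simp [firstIdx] at h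
  | cons x xs ih =>
    simp only [firstIdx] at h
    split_ifs at h with hx
    · simp at h ⊢; omega
    · rcases Option.map_eq_some_iff.mp h with ⟨j, hj, rfl⟩
      have := ih hj
      simp; omega

theorem firstIdx_append (xs ys : List (Option Int)) :
    firstIdx (xs ++ ys) =
      match firstIdx xs with
      | some i => some i
      | none => (firstIdx ys).map (· + xs.length) := by
  induction xs with
  | nil => simp [firstIdx]
  | cons x xs ih =>
    simp only [List.cons_append, firstIdx, ih]
    split_ifs with hx
    · rfl
    · cases h : firstIdx xs with
      | some i => simp
      | none =>
        cases firstIdx ys with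
        | none => simp
        | some j => simp; omega

theorem lastIdx_eq_firstIdx_reverse (xs : List (Option Int)) :
    lastIdx xs = (firstIdx xs.reverse).map (fun i => xs.length - 1 - i) := by
  induction xs with
  | nil => simp [lastIdx, firstIdx]
  | cons x xs ih =>
    simp only [List.reverse_cons, firstIdx_append, lastIdx, ih]
    cases h : firstIdx xs.reverse with
    | some i =>
      have hi : i < xs.length := by
        have := firstIdx_lt h
        simpa using this
      simp; omega
    | none =>
      simp only [Option.map_none]
      split_ifs with hx
      · simp [firstIdx, hx]
      · simp [firstIdx, hx]

-- A's loop returns llen - i - 1 for the first hit i (offset by the enumeration start k)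
theorem lastA_loop_spec (llen k : Int) (xs : List (Option Int)) :
    lastA_loop llen (PySem.List.enumerate xs k) =
      (firstIdx xs).map (fun i => llen - (k + i) - 1) := by
  induction xs generalizing k with
  | nil => simp [PySem.List.enumerate, firstIdx, lastA_loop]
  | cons x xs ih =>
    simp only [PySem.List.enumerate, lastA_loop, firstIdx]
    split_ifs with hx
    · simp
    · rw [ih]
      cases firstIdx xs with
      | none => simp
      | some i => simp; ring_nf

-- B's loop keeps the index of the last non-None element (offset by k), else the accumulator
theorem lastB_loop_spec (acc : Option Int) (k : Int) (xs : List (Option Int)) :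
    (PySem.List.enumerate xs k).foldl
        (fun last p => if p.2 ≠ none then some p.1 else last) acc =
      match lastIdx xs with
      | some j => some (k + j)
      | none => acc := by
  induction xs generalizing acc k with
  | nil => simp [PySem.List.enumerate, lastIdx]
  | cons x xs ih =>
    simp only [PySem.List.enumerate, List.foldl_cons, lastIdx, ih]
    cases lastIdx xs with
    | some j => simp; ring
    | none =>
      split_ifs with hx <;> simp

theorem both_eq (alist : List (Option Int)) :
    last_not_None alist = last_not_None_alt alist := by
  unfold last_not_None last_not_None_alt
  rw [lastA_loop_spec _ 0, lastB_loop_spec none 0,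
      show (firstIdx alist.reverse) =
        (firstIdx alist.reverse) from rfl]
  have h := lastIdx_eq_firstIdx_reverse alist
  cases hf : firstIdx alist.reverse with
  | none =>
    have : lastIdx alist = none := by rw [h, hf]; rfl
    simp [this]
  | some i =>
    have hi : i < alist.length := by
      have := firstIdx_lt hf
      simpa using this
    have : lastIdx alist = some (alist.length - 1 - i) := by rw [h, hf]; rfl
    simp [this]
    omega

-- ===== VERDICT (by name: the statement is the Claim_ definition above) =====
theorem last_not_None_spec : Claim_equal_last_not_None := by
  intro alist _
  unfold Spec_last_not_None
  exact both_eq alist
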